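-- pv_equiv track=rewrite | github.com/981377660LMT/algorithm-study | 19_数学/mod_linear/floor_sum_of_linear.py | floor_sum_of_linear
-- ===== SOURCE A (Python) =====
-- from math import ceil
--
-- def floor_sum_of_linear(L: int, R: int, a: int, b: int, mod: int) -> int:
--     """
--     ```
--     sum((x * a + b) // mod for x in range(L, R))
--     ```
--     """
--     if L >= R:
--         return 0
--     res = 0
--     b += L * a
--     n = R - L
--
--     if b < 0:
--         k = ceil(-b / mod)
--         b += k * mod
--         res -= n * k
--
--     while n:
--         q, a = a // mod, a % mod
--         res += n * (n - 1) // 2 * q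
--         # res %= MOD
--         if b >= mod:
--             q, b = b // mod, b % mod
--             res += n * q
--             # res %= MOD
--         n, b = (a * n + b) // mod, (a * n + b) % mod
--         a, mod = mod, a
--
--     return res
-- ===== SOURCE B (Python) =====
-- def _fs(n, m, a, b):
--     # sum of (a*x + b) // m for x in range(n);  m > 0, n > 0 at every call
--     qa, ra = divmod(a, m)
--     qb, rb = divmod(b, m)
--     res = qa * n * (n - 1) // 2 + qb * n
--     y = (ra * n + rb) // m
--     if y == 0:
--         return res
--     return res + n * y - y - _fs(y, ra, m, m - rb - 1)
--
--
-- def floor_sum_of_linear(L: int, R: int, a: int, b: int, mod: int) -> int: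
--     if L >= R:
--         return 0
--     return _fs(R - L, mod, a, b + L * a)
-- ===== Notes on version B (the rewrite author's own statement) =====
-- stated objective: alternative
-- what changed: B replaces A's divisor-swapping while-loop and its float math.ceil pre-step for negative offsets by a divmod normalisation followed by the complement-form recursion fs(n,m,a,b) = n*y - y - fs(y,a,m,m-b-1).
-- outside the precondition, e.g. on floor_sum_of_linear(-1, 2, -2, 1, -7): A returns -1, B returns -3
import Mathlib
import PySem

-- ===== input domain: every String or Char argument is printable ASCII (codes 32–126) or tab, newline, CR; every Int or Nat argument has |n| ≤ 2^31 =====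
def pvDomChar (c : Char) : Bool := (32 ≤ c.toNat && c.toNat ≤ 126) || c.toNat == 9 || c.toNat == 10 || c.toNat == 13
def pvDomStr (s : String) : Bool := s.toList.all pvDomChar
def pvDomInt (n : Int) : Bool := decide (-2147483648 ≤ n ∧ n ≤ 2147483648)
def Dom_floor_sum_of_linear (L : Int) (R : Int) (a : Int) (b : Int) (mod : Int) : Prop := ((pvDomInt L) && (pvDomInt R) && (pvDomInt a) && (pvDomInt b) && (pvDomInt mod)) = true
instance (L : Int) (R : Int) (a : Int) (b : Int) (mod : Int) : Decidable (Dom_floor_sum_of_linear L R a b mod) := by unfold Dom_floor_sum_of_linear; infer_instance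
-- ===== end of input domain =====

-- B replaces A's divisor-swapping while-loop with float-ceil pre-step by a divmod normalisation plus the
-- complement-form recursion n*y - y - fs(y, ...); an alternative exact algorithm of the same cost, float-free.

-- ===== PORT A =====
-- the 'while n:' loop of A; state (mod, n, a, b, res); the 'if hm : 0 < mod' guard only makes the
-- recursion total (inside Pre_ the divisor is always positive; mod = 0 raises in Python and is outside Pre_)
def floorSumLoopA (mod n a b res : Int) : Int :=
  if _hm : 0 < mod then
    if n = 0 then res
    else
      let q := PySem.Int.floordiv a mod
      let a' := PySem.Int.mod a mod
      let res1 := res + PySem.Int.floordiv (n * (n - 1)) 2 * q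
      let p := if mod ≤ b then (res1 + n * PySem.Int.floordiv b mod, PySem.Int.mod b mod) else (res1, b)
      let n' := PySem.Int.floordiv (a' * n + p.2) mod
      let b' := PySem.Int.mod (a' * n + p.2) mod
      floorSumLoopA a' n' mod b' p.1
  else res
termination_by mod.toNat
decreasing_by
  have h2 : PySem.Int.mod a mod < mod := by
    rw [PySem.Int.mod_eq_emod_of_pos _hm]; exact Int.emod_lt_of_pos a _hm
  omega

def floor_sum_of_linear (L : Int) (R : Int) (a : Int) (b : Int) (mod : Int) : Int :=
  if L ≥ R then 0
  else
    let b1 := b + L * a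
    let n := R - L
    -- Python computes k = math.ceil(-b1 / mod) through float division; PySem has no floats, so the
    -- ceiling is ported exactly as k = -(b1 // mod), which equals math.ceil(-b1 / mod) on Pre_
    -- (mod > 0 and b1 ≥ -2^53, where the float division is exact enough)
    let p := if b1 < 0 then
        let k := -(PySem.Int.floordiv b1 mod)
        (b1 + k * mod, 0 - n * k)
      else (b1, 0)
    floorSumLoopA mod n a p.1 p.2

-- ===== PORT B =====
-- _fs of Source B; the 'if hm : 0 < m' guard only makes the recursion total (every call has m > 0 inside Pre_)
def fsB (m n a b : Int) : Int :=
  if hm : 0 < m then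
    let qa := PySem.Int.floordiv a m
    let ra := PySem.Int.mod a m
    let qb := PySem.Int.floordiv b m
    let rb := PySem.Int.mod b m
    let res := PySem.Int.floordiv (qa * n * (n - 1)) 2 + qb * n
    let y := PySem.Int.floordiv (ra * n + rb) m
    if y = 0 then res
    else res + n * y - y - fsB ra y m (m - rb - 1)
  else 0
termination_by m.toNat
decreasing_by
  have h2 : PySem.Int.mod a m < m := by
    rw [PySem.Int.mod_eq_emod_of_pos hm]; exact Int.emod_lt_of_pos a hm
  have h1 : 0 ≤ PySem.Int.mod a m := by
    rw [PySem.Int.mod_eq_emod_of_pos hm]; exact Int.emod_nonneg a (by omega)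
  omega

def floor_sum_of_linear_alt (L : Int) (R : Int) (a : Int) (b : Int) (mod : Int) : Int :=
  if L ≥ R then 0
  else fsB mod (R - L) a (b + L * a)

-- ===== PRECONDITION & SPEC =====
-- Pre_ excludes (for L < R) mod ≤ 0 — where A raises ZeroDivisionError or returns accidental values of a
-- reduction that assumes mod > 0 — and b + L*a < -2^53, where math.ceil's float division can be inexact
-- and A's returned value is a float-rounding artefact off by a multiple of the range length.
def Pre_floor_sum_of_linear (L : Int) (R : Int) (a : Int) (b : Int) (mod : Int) : Prop :=
  R ≤ L ∨ (0 < mod ∧ -(2 ^ 53) ≤ b + L * a)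
instance (L : Int) (R : Int) (a : Int) (b : Int) (mod : Int) : Decidable (Pre_floor_sum_of_linear L R a b mod) := by unfold Pre_floor_sum_of_linear; infer_instance

def pvWitness_floor_sum_of_linear : Int × Int × Int × Int × Int := (0, 5, 3, 1, 7)

def Spec_floor_sum_of_linear (L : Int) (R : Int) (a : Int) (b : Int) (mod : Int) (out : Int) : Prop := out = floor_sum_of_linear_alt L R a b mod
instance (L : Int) (R : Int) (a : Int) (b : Int) (mod : Int) (out : Int) : Decidable (Spec_floor_sum_of_linear L R a b mod out) := by unfold Spec_floor_sum_of_linear; infer_instance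

-- ===== CLAIM (what is proved, stated in full; the proofs are below) =====
def Claim_equal_floor_sum_of_linear : Prop := ∀ (L : Int) (R : Int) (a : Int) (b : Int) (mod : Int), Dom_floor_sum_of_linear L R a b mod → Pre_floor_sum_of_linear L R a b mod → Spec_floor_sum_of_linear L R a b mod (floor_sum_of_linear L R a b mod)

-- ===== LEMMAS AND PROOFS =====

-- the mathematical sum both programs compute: ∑_{x<N} ⌊(a x + b) / m⌋ (ediv; divisors are positive throughout)
def fsum (N : Nat) (a b m : Int) : Int := ∑ x ∈ Finset.range N, (a * (x : Int) + b) / m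

-- shifting b by a multiple of the modulus
lemma fsum_shift (N : Nat) (a b m t : Int) (hm : m ≠ 0) :
    fsum N a (b + m * t) m = fsum N a b m + N * t := by
  unfold fsum
  have h : ∀ x ∈ Finset.range N, (a * (x : Int) + (b + m * t)) / m = (a * x + b) / m + t := by
    intro x _
    have := Int.add_mul_ediv_left (a * (x : Int) + b) t hm
    rw [← this]; ring_nf
  rw [Finset.sum_congr rfl h, Finset.sum_add_distrib, Finset.sum_const, Finset.card_range,
    nsmul_eq_mul]

-- splitting off the quotient of a
lemma fsum_reduce_a (N : Nat) (a b m : Int) (hm : 0 < m) :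
    fsum N a b m = (N * (N - 1)) / 2 * (a / m) + fsum N (a % m) b m := by
  have gauss : (∑ x ∈ Finset.range N, (x : Int)) * 2 = N * (N - 1) := by
    induction N with
    | zero => simp
    | succ k ih => rw [Finset.sum_range_succ]; push_cast; push_cast at ih; ring_nf; ring_nf at ih; omega
  have hN : ((N : Int) * (N - 1)) / 2 = ∑ x ∈ Finset.range N, (x : Int) := by
    rw [← gauss, Int.mul_ediv_cancel _ (by norm_num)]
  unfold fsum
  have h : ∀ x ∈ Finset.range N, (a * (x : Int) + b) / m = (a % m * x + b) / m + (a / m) * x := by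
    intro x _
    have e : a * (x : Int) + b = (a % m * x + b) + m * ((a / m) * x) := by
      conv_lhs => rw [← Int.mul_ediv_add_emod a m]
      ring
    rw [e, Int.add_mul_ediv_left _ _ (by omega : m ≠ 0)]
  rw [Finset.sum_congr rfl h, Finset.sum_add_distrib, ← Finset.mul_sum, ← hN]
  ring

-- a floor quotient as a 0/1 count: ⌊c/m⌋ = #{y < K : m(y+1) ≤ c}
lemma sum_ite_lt (K T : Nat) (h : T ≤ K) :
    (∑ y ∈ Finset.range K, if y < T then (1 : Int) else 0) = T := by
  rw [← Finset.sum_filter]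
  have e : (Finset.range K).filter (fun y => y < T) = Finset.range T := by
    ext y; simp; omega
  rw [e]
  simp

lemma count_div (m c : Int) (K : Nat) (hm : 0 < m) (hc : 0 ≤ c) (hK : c / m ≤ (K : Int)) :
    (∑ y ∈ Finset.range K, if m * ((y : Int) + 1) ≤ c then (1 : Int) else 0) = c / m := by
  have hd : 0 ≤ c / m := Int.ediv_nonneg hc hm.le
  have h1 : ∀ y ∈ Finset.range K,
      (if m * ((y : Int) + 1) ≤ c then (1 : Int) else 0) = (if y < (c / m).toNat then (1 : Int) else 0) := by
    intro y _
    refine if_congr ?_ rfl rfl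
    rw [show m * ((y : Int) + 1) = ((y : Int) + 1) * m by ring, ← Int.le_ediv_iff_mul_le hm]
    omega
  rw [Finset.sum_congr rfl h1, sum_ite_lt _ _ (by omega)]
  omega

-- the divisor-swap identity (hyperbola counting)
lemma fsum_swap (n : Nat) (r b m : Int) (hm : 0 < m) (hr : 0 < r) (hb : 0 ≤ b) (hbm : b < m) :
    fsum n r b m = fsum ((r * n + b) / m).toNat m ((r * n + b) % m) r := by
  set q : Int := (r * (n : Int) + b) / m with hqdef
  set p : Int := (r * (n : Int) + b) % m with hpdef
  have hrnb : 0 ≤ r * (n : Int) + b := by positivity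
  have hq0 : 0 ≤ q := Int.ediv_nonneg hrnb hm.le
  have hp0 : 0 ≤ p := Int.emod_nonneg _ (by omega)
  have hpm : p < m := Int.emod_lt_of_pos _ hm
  have key : m * q + p = r * (n : Int) + b := Int.mul_ediv_add_emod _ _
  have hN' : (q.toNat : Int) = q := Int.toNat_of_nonneg hq0
  have lhs_eq : fsum n r b m = ∑ x ∈ Finset.range n, ∑ y ∈ Finset.range q.toNat,
      (if m * ((y : Int) + 1) ≤ r * (x : Int) + b then (1 : Int) else 0) := by
    unfold fsum
    refine Finset.sum_congr rfl (fun x hx => ?_)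
    have hx' : (x : Int) < n := by exact_mod_cast Finset.mem_range.mp hx
    have hb1 : 0 ≤ r * (x : Int) + b := by positivity
    have hbound : (r * (x : Int) + b) / m ≤ (q.toNat : Int) := by
      rw [hN', hqdef]
      exact Int.ediv_le_ediv hm (by nlinarith)
    exact (count_div m (r * (x : Int) + b) q.toNat hm hb1 hbound).symm
  have rhs_eq : fsum q.toNat m p r = ∑ y ∈ Finset.range q.toNat, ∑ x ∈ Finset.range n,
      (if r * ((x : Int) + 1) ≤ m * (y : Int) + p then (1 : Int) else 0) := by
    unfold fsum
    refine Finset.sum_congr rfl (fun y hy => ?_)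
    have hy' : (y : Int) < q := by
      have := Finset.mem_range.mp hy; omega
    have hb1 : 0 ≤ m * (y : Int) + p := by positivity
    have hbound : (m * (y : Int) + p) / r ≤ (n : Int) := by
      have hlt : m * (y : Int) + p < (n : Int) * r := by nlinarith
      have := (Int.ediv_lt_iff_lt_mul hr).mpr hlt
      omega
    exact (count_div r (m * (y : Int) + p) n hr hb1 hbound).symm
  rw [lhs_eq, rhs_eq, Finset.sum_comm]
  have refl2 : ∑ y ∈ Finset.range q.toNat, ∑ x ∈ Finset.range n,
      (if r * ((x : Int) + 1) ≤ m * (y : Int) + p then (1 : Int) else 0)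
      = ∑ y ∈ Finset.range q.toNat, ∑ x ∈ Finset.range n,
      (if r * ((↑(n - 1 - x) : Int) + 1) ≤ m * (↑(q.toNat - 1 - y) : Int) + p then (1 : Int) else 0) := by
    rw [← Finset.sum_range_reflect]
    refine Finset.sum_congr rfl (fun y _ => ?_)
    rw [← Finset.sum_range_reflect]
  rw [refl2]
  refine Finset.sum_congr rfl (fun y hy => Finset.sum_congr rfl (fun x hx => ?_))
  have hxn := Finset.mem_range.mp hx
  have hyq := Finset.mem_range.mp hy
  have cx : (↑(n - 1 - x) : Int) = (n : Int) - 1 - x := by omega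
  have cy : (↑(q.toNat - 1 - y) : Int) = q - 1 - y := by omega
  rw [cx, cy]
  refine if_congr ?_ rfl rfl
  constructor <;> intro h <;> nlinarith [key]

-- each term is 0 when the (reduced) coefficient is 0
lemma fsum_zero_coeff (N : Nat) (c m : Int) (hc0 : 0 ≤ c) (hcm : c < m) :
    fsum N 0 c m = 0 := by
  unfold fsum
  have h : ∀ x ∈ Finset.range N, ((0 : Int) * (x : Int) + c) / m = 0 := by
    intro x _
    rw [zero_mul, zero_add]
    exact Int.ediv_eq_zero_of_lt hc0 hcm
  rw [Finset.sum_congr rfl h]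
  simp

-- the recursive call of A's loop, shared by both branches of the 'if b >= mod'
lemma swap_tail (k : Nat) (mod n r c res2 : Int)
    (ih : ∀ (mod' n' a' b' res' : Int), mod'.toNat ≤ k → 0 < mod' → 0 ≤ n' → 0 ≤ b' →
      floorSumLoopA mod' n' a' b' res' = res' + fsum n'.toNat a' b' mod')
    (hm : 0 < mod) (hk : mod.toNat ≤ k + 1) (hn : 0 < n)
    (hr0 : 0 ≤ r) (hrm : r < mod) (hc0 : 0 ≤ c) (hcm : c < mod) :
    floorSumLoopA r ((r * n + c) / mod) mod ((r * n + c) % mod) res2 = res2 + fsum n.toNat r c mod := by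
  have hrnc : 0 ≤ r * n + c := by nlinarith
  have hn'0 : 0 ≤ (r * n + c) / mod := Int.ediv_nonneg hrnc hm.le
  have hb'0 : 0 ≤ (r * n + c) % mod := Int.emod_nonneg _ (by omega)
  have hcast : ((n.toNat : Int)) = n := Int.toNat_of_nonneg hn.le
  by_cases hr : 0 < r
  · rw [ih r _ mod _ res2 (by omega) hr hn'0 hb'0]
    congr 1
    have h := fsum_swap n.toNat r c mod hm hr hc0 hcm
    rw [hcast] at h
    exact h.symm
  · have hr0' : r = 0 := by omega
    subst hr0'
    rw [floorSumLoopA, dif_neg (by omega)]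
    rw [fsum_zero_coeff n.toNat c mod hc0 hcm, add_zero]

-- correctness of A's loop
lemma loop_correct (k : Nat) (mod n a b res : Int) (hk : mod.toNat ≤ k) (hm : 0 < mod)
    (hn : 0 ≤ n) (hb : 0 ≤ b) :
    floorSumLoopA mod n a b res = res + fsum n.toNat a b mod := by
  induction k generalizing mod n a b res with
  | zero => omega
  | succ k ih =>
    rw [floorSumLoopA, dif_pos hm]
    by_cases hn0 : n = 0
    · subst hn0; simp [fsum]
    · rw [if_neg hn0]
      simp only [PySem.Int.floordiv_eq_ediv_of_pos hm, PySem.Int.mod_eq_emod_of_pos hm,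
        PySem.Int.floordiv_eq_ediv_of_pos (show (0:Int) < 2 by norm_num)]
      have hn1 : 0 < n := lt_of_le_of_ne hn (Ne.symm hn0)
      have hcast : ((n.toNat : Int)) = n := Int.toNat_of_nonneg hn
      have hr0 : 0 ≤ a % mod := Int.emod_nonneg a (by omega)
      have hrm : a % mod < mod := Int.emod_lt_of_pos a hm
      have e1 : fsum n.toNat a b mod = (n * (n - 1)) / 2 * (a / mod) + fsum n.toNat (a % mod) b mod := by
        have h := fsum_reduce_a n.toNat a b mod hm
        rw [hcast] at h
        exact h
      by_cases hbm : mod ≤ b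
      · simp only [if_pos hbm]
        have hc0 : 0 ≤ b % mod := Int.emod_nonneg b (by omega)
        have hcm : b % mod < mod := Int.emod_lt_of_pos b hm
        have e2 : fsum n.toNat (a % mod) b mod = fsum n.toNat (a % mod) (b % mod) mod + n * (b / mod) := by
          have h := fsum_shift n.toNat (a % mod) (b % mod) mod (b / mod) (by omega)
          rw [hcast] at h
          rw [show b % mod + mod * (b / mod) = b from by
            exact Int.emod_add_mul_ediv b mod] at h
          rw [h]
        rw [swap_tail k mod n (a % mod) (b % mod) _ ih hm hk hn1 hr0 hrm hc0 hcm, e1, e2]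
        ring
      · simp only [if_neg hbm]
        rw [swap_tail k mod n (a % mod) b _ ih hm hk hn1 hr0 hrm hb (by omega), e1]
        ring

-- B's port as fsum
-- the complement identity behind B's recursion:
-- ∑_{x<n} ⌊(ax+b)/m⌋ = n·y − y − ∑_{j<y} ⌊(mj + (m−b−1))/a⌋  with y = ⌊(an+b)/m⌋
lemma fsum_complement (n : Nat) (a b m : Int) (hm : 0 < m) (ha : 0 < a)
    (hb0 : 0 ≤ b) (hbm : b < m) :
    fsum n a b m = (n : Int) * ((a * n + b) / m) - (a * n + b) / m
      - fsum ((a * n + b) / m).toNat m (m - b - 1) a := by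
  set y : Int := (a * (n : Int) + b) / m with hydef
  have hanb : 0 ≤ a * (n : Int) + b := by positivity
  have hy0 : 0 ≤ y := Int.ediv_nonneg hanb hm.le
  have hN' : (y.toNat : Int) = y := Int.toNat_of_nonneg hy0
  have hmy : m * y ≤ a * (n : Int) + b := by
    rw [hydef]
    have h := Int.mul_ediv_add_emod (a * (n : Int) + b) m
    have h2 := Int.emod_nonneg (a * (n : Int) + b) (show m ≠ 0 by omega)
    omega
  have lhs_eq : fsum n a b m = ∑ x ∈ Finset.range n, ∑ j ∈ Finset.range y.toNat,
      (if m * ((j : Int) + 1) ≤ a * (x : Int) + b then (1 : Int) else 0) := by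
    unfold fsum
    refine Finset.sum_congr rfl (fun x hx => ?_)
    have hx' : (x : Int) < n := by exact_mod_cast Finset.mem_range.mp hx
    have hb1 : 0 ≤ a * (x : Int) + b := by positivity
    have hbound : (a * (x : Int) + b) / m ≤ (y.toNat : Int) := by
      rw [hN', hydef]
      exact Int.ediv_le_ediv hm (by nlinarith)
    exact (count_div m (a * (x : Int) + b) y.toNat hm hb1 hbound).symm
  have comp_eq : fsum y.toNat m (m - b - 1) a + y = ∑ j ∈ Finset.range y.toNat, ∑ x ∈ Finset.range n,
      (if ¬ m * ((j : Int) + 1) ≤ a * (x : Int) + b then (1 : Int) else 0) := by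
    have step : ∀ j ∈ Finset.range y.toNat, ((m * (j : Int) + (m - b - 1)) / a + 1)
        = ∑ x ∈ Finset.range n, (if ¬ m * ((j : Int) + 1) ≤ a * (x : Int) + b then (1 : Int) else 0) := by
      intro j hj
      have hj' : (j : Int) < y := by
        have := Finset.mem_range.mp hj; omega
      have hj0 : (0 : Int) ≤ (j : Int) := by positivity
      have hmj0 : 0 ≤ m * (j : Int) := mul_nonneg hm.le hj0
      have hc1 : 0 ≤ m * (j : Int) + (m - b - 1) + a := by omega
      have hbound : (m * (j : Int) + (m - b - 1) + a) / a ≤ (n : Int) := by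
        have := (Int.ediv_lt_iff_lt_mul ha).mpr (show m * (j : Int) + (m - b - 1) + a < ((n : Int) + 1) * a by nlinarith)
        omega
      have hcount := count_div a (m * (j : Int) + (m - b - 1) + a) n ha hc1 hbound
      have hsplit : (m * (j : Int) + (m - b - 1) + a) / a = (m * (j : Int) + (m - b - 1)) / a + 1 := by
        have h := Int.add_mul_ediv_left (m * (j : Int) + (m - b - 1)) 1 (show a ≠ 0 by omega)
        rw [mul_one] at h
        omega
      rw [hsplit] at hcount
      rw [← hcount]
      refine Finset.sum_congr rfl (fun x _ => ?_)
      refine if_congr ?_ rfl rfl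
      constructor <;> intro h <;> nlinarith
    have hsum := Finset.sum_congr rfl step
    rw [Finset.sum_add_distrib, Finset.sum_const, Finset.card_range, nsmul_eq_mul, mul_one, hN'] at hsum
    unfold fsum
    exact hsum
  have total : (∑ x ∈ Finset.range n, ∑ j ∈ Finset.range y.toNat,
      (if m * ((j : Int) + 1) ≤ a * (x : Int) + b then (1 : Int) else 0))
      + (∑ j ∈ Finset.range y.toNat, ∑ x ∈ Finset.range n,
      (if ¬ m * ((j : Int) + 1) ≤ a * (x : Int) + b then (1 : Int) else 0))
      = (n : Int) * y := by
    rw [Finset.sum_comm (s := Finset.range n)]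
    rw [← Finset.sum_add_distrib]
    have h : ∀ j ∈ Finset.range y.toNat, ((∑ x ∈ Finset.range n,
        (if m * ((j : Int) + 1) ≤ a * (x : Int) + b then (1 : Int) else 0))
        + ∑ x ∈ Finset.range n,
        (if ¬ m * ((j : Int) + 1) ≤ a * (x : Int) + b then (1 : Int) else 0)) = (n : Int) := by
      intro j _
      rw [← Finset.sum_add_distrib]
      have h2 : ∀ x ∈ Finset.range n, ((if m * ((j : Int) + 1) ≤ a * (x : Int) + b then (1 : Int) else 0)
          + if ¬ m * ((j : Int) + 1) ≤ a * (x : Int) + b then (1 : Int) else 0) = (1 : Int) := by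
        intro x _
        by_cases hP : m * ((j : Int) + 1) ≤ a * (x : Int) + b <;> simp [hP]
      rw [Finset.sum_congr rfl h2]
      simp
    rw [Finset.sum_congr rfl h, Finset.sum_const, Finset.card_range, nsmul_eq_mul, hN']
    ring
  have := comp_eq
  rw [lhs_eq]
  omega

-- correctness of B's recursion
lemma fsB_correct (k : Nat) (m n a b : Int) (hk : m.toNat ≤ k) (hm : 0 < m) (hn : 0 ≤ n) :
    fsB m n a b = fsum n.toNat a b m := by
  induction k generalizing m n a b with
  | zero => omega
  | succ k ih =>
    rw [fsB, dif_pos hm]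
    simp only [PySem.Int.floordiv_eq_ediv_of_pos hm, PySem.Int.mod_eq_emod_of_pos hm,
      PySem.Int.floordiv_eq_ediv_of_pos (show (0:Int) < 2 by norm_num)]
    have hcast : ((n.toNat : Int)) = n := Int.toNat_of_nonneg hn
    have hra0 : 0 ≤ a % m := Int.emod_nonneg a (by omega)
    have hram : a % m < m := Int.emod_lt_of_pos a hm
    have hrb0 : 0 ≤ b % m := Int.emod_nonneg b (by omega)
    have hrbm : b % m < m := Int.emod_lt_of_pos b hm
    -- the Gauss term: (qa·n·(n−1))/2 = n(n−1)/2 · qa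
    obtain ⟨t, ht⟩ := Int.even_mul_succ_self (n - 1)
    have hgauss : (a / m * n * (n - 1)) / 2 = (n * (n - 1)) / 2 * (a / m) := by
      have h1 : a / m * n * (n - 1) = 2 * (a / m * t) := by linear_combination (a / m) * ht
      have h2 : n * (n - 1) = 2 * t := by linear_combination ht
      rw [h1, h2, Int.mul_ediv_cancel_left _ (by norm_num : (2:Int) ≠ 0),
        Int.mul_ediv_cancel_left _ (by norm_num : (2:Int) ≠ 0)]
      ring
    have e1 : fsum n.toNat a b m = (n * (n - 1)) / 2 * (a / m) + fsum n.toNat (a % m) b m := by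
      have h := fsum_reduce_a n.toNat a b m hm
      rw [hcast] at h
      exact h
    have e2 : fsum n.toNat (a % m) b m = fsum n.toNat (a % m) (b % m) m + n * (b / m) := by
      have h := fsum_shift n.toNat (a % m) (b % m) m (b / m) (by omega)
      rw [hcast, show b % m + m * (b / m) = b from by
        exact Int.emod_add_mul_ediv b m] at h
      rw [h]
    by_cases hy : (a % m * n + b % m) / m = 0
    · rw [if_pos hy]
      have hz : fsum n.toNat (a % m) (b % m) m = 0 := by
        unfold fsum
        have hnm : a % m * n + b % m < m := by
          by_contra hc
          push Not at hc
          have h1 : 1 ≤ (a % m * n + b % m) / m := by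
            have := (Int.le_ediv_iff_mul_le hm).mpr (show (1:Int) * m ≤ a % m * n + b % m by omega)
            omega
          omega
        have h : ∀ x ∈ Finset.range n.toNat, (a % m * (x : Int) + b % m) / m = 0 := by
          intro x hx
          have hx' : (x : Int) < n := by
            have := Finset.mem_range.mp hx; omega
          have hx0 : (0:Int) ≤ (x:Int) := by positivity
          refine Int.ediv_eq_zero_of_lt (by positivity) ?_
          nlinarith
        rw [Finset.sum_congr rfl h]
        simp
      rw [e1, e2, hz, hgauss]
      ring
    · rw [if_neg hy]
      have hanb : 0 ≤ a % m * n + b % m := by positivity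
      have hy0 : 0 < (a % m * n + b % m) / m := by
        have := Int.ediv_nonneg hanb hm.le
        omega
      have hra : 0 < a % m := by
        rcases lt_or_eq_of_le hra0 with h | h
        · exact h
        · exfalso
          rw [← h] at hy0
          simp only [zero_mul, zero_add] at hy0 hy
          have := Int.ediv_eq_zero_of_lt hrb0 hrbm
          omega
      have hcomp := fsum_complement n.toNat (a % m) (b % m) m hm hra hrb0 hrbm
      rw [hcast] at hcomp
      have hrec := ih (a % m) ((a % m * n + b % m) / m) m (m - b % m - 1) (by omega) hra
        (Int.ediv_nonneg hanb hm.le)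
      rw [hrec, e1, e2, hcomp, hgauss]
      ring
-- ===== VERDICT (by name: the statement is the Claim_ definition above) =====
theorem floor_sum_of_linear_spec : Claim_equal_floor_sum_of_linear := by
  intro L R a b mod _ hpre
  unfold Spec_floor_sum_of_linear floor_sum_of_linear
  by_cases hLR : L ≥ R
  · rw [if_pos hLR]
    unfold floor_sum_of_linear_alt
    rw [if_pos hLR]
  · rw [if_neg hLR]
    rcases hpre with h | ⟨hm, _⟩
    · omega
    simp only [PySem.Int.floordiv_eq_ediv_of_pos hm]
    have hn0 : (0 : Int) ≤ R - L := by omega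
    have hcast : (((R - L).toNat : Int)) = R - L := Int.toNat_of_nonneg hn0
    have hB : floor_sum_of_linear_alt L R a b mod = fsum (R - L).toNat a (b + L * a) mod := by
      unfold floor_sum_of_linear_alt
      rw [if_neg hLR]
      exact fsB_correct mod.toNat mod (R - L) a (b + L * a) le_rfl hm (by omega)
    rw [hB]
    by_cases hneg : b + L * a < 0
    · simp only [if_pos hneg]
      have hb2 : b + L * a + -((b + L * a) / mod) * mod = (b + L * a) % mod := by
        rw [Int.emod_def]; ring
      rw [hb2]
      have hc0 : 0 ≤ (b + L * a) % mod := Int.emod_nonneg _ (by omega)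
      rw [loop_correct mod.toNat mod (R - L) a _ _ le_rfl hm hn0 hc0]
      have h := fsum_shift (R - L).toNat a ((b + L * a) % mod) mod ((b + L * a) / mod) (by omega)
      rw [hcast, show (b + L * a) % mod + mod * ((b + L * a) / mod) = b + L * a from by
        exact Int.emod_add_mul_ediv _ _] at h
      rw [h]
      ring
    · simp only [if_neg hneg]
      rw [loop_correct mod.toNat mod (R - L) a (b + L * a) 0 le_rfl hm hn0 (by omega)]
      ring
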